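-- pv_equiv track=rewrite | github.com/unknowncash/chkpublico | plugins/users/separador.py | get_numbers_sequence
-- ===== SOURCE A (Python) =====
-- def get_numbers_sequence(content):
--     caracteres = str(content.replace(r'\n', '\n').replace('\n', ' '))
--     sublista = []
--     blacklist = ['.', ':']
--     for caractere in caracteres:
--         if caractere.isnumeric() or caractere in blacklist:
--             sublista.append(caractere)
--
--         else:
--             sublista.append(' ')
--
--
--     results = ''.join(sublista).split()
--     lista = []
--
--     for result in results:
--         if result.isnumeric():
--             lista.append(result)
--
--     return lista
-- ===== SOURCE B (Python) =====
-- def get_numbers_sequence(content):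
--     text = content.replace(r'\n', '\n').replace('\n', ' ')
--     out = []
--     buf = ''
--     for c in text:
--         if c.isnumeric() or c in ('.', ':'):
--             buf += c
--         else:
--             if buf and buf.isnumeric():
--                 out.append(buf)
--             buf = ''
--     if buf and buf.isnumeric():
--         out.append(buf)
--     return out
-- ===== Notes on version B (the rewrite author's own statement) =====
-- stated objective: simpler
-- what changed: Replaces A's map-chars-to-spaces -> join -> split -> filter pipeline with a single explicit tokenizer pass that keeps a current-token buffer and flushes it (emitting it only when fully numeric) at each separator.
import Mathlib
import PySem

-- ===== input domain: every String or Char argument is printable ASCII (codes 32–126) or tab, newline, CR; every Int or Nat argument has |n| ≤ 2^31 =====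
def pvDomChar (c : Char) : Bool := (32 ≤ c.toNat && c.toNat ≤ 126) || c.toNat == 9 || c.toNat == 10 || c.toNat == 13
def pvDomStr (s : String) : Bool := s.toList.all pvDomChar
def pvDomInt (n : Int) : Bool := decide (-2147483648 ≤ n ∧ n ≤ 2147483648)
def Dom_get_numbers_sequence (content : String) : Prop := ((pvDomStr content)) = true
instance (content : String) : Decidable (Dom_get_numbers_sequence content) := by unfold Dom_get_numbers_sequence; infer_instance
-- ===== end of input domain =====

-- B replaces A's map-to-spaces → join → split → filter pipeline by a single buffered tokenizer pass; objective: simpler.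


-- ===== PORT A =====
-- 'isnumeric' is ported as PySem.Chars.isdigit / strIsdigit: exact on the printable-ASCII domain.
def get_numbers_sequence (content : String) : List String :=
  let caracteres := (PySem.Str.replace (PySem.Str.replace content "\\n" "\n") "\n" " ").toList
  let sublista : List (List Char) :=
    caracteres.foldl (fun acc c =>
      acc ++ [if PySem.Chars.isdigit c || c == '.' || c == ':' then [c] else [' ']]) []
  let results := PySem.Chars.split₀ (PySem.Chars.join [] sublista)
  (results.foldl (fun lista r => if PySem.Chars.strIsdigit r then lista ++ [r] else lista) []).map String.mk

-- ===== PORT B =====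
-- the tokenizer loop of Source B: out = accumulated results, buf = current run of kept characters
def gnsAltGo : List Char → List (List Char) → List Char → List (List Char)
  | [], out, buf => if !buf.isEmpty && PySem.Chars.strIsdigit buf then out ++ [buf] else out
  | c :: rest, out, buf =>
    if PySem.Chars.isdigit c || c == '.' || c == ':' then
      gnsAltGo rest out (buf ++ [c])
    else
      gnsAltGo rest (if !buf.isEmpty && PySem.Chars.strIsdigit buf then out ++ [buf] else out) []

def get_numbers_sequence_alt (content : String) : List String :=
  let text := (PySem.Str.replace (PySem.Str.replace content "\\n" "\n") "\n" " ").toList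
  (gnsAltGo text [] []).map String.mk

-- ===== PRECONDITION & SPEC =====
def Spec_get_numbers_sequence (content : String) (out : List String) : Prop := out = get_numbers_sequence_alt content
instance (content : String) (out : List String) : Decidable (Spec_get_numbers_sequence content out) := by unfold Spec_get_numbers_sequence; infer_instance

-- ===== CLAIM (what is proved, stated in full; the proofs are below) =====
def Claim_equal_get_numbers_sequence : Prop := ∀ (content : String), Dom_get_numbers_sequence content → Spec_get_numbers_sequence content (get_numbers_sequence content)

-- ===== LEMMAS AND PROOFS =====
-- the character classifier shared by both sides
def gnsKept (c : Char) : Bool := PySem.Chars.isdigit c || c == '.' || c == ':'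

theorem gnsKept_not_space (c : Char) (h : gnsKept c = true) : PySem.Chars.isspace c = false := by
  have hn : (48 ≤ c.toNat ∧ c.toNat ≤ 57) ∨ c.toNat = 46 ∨ c.toNat = 58 := by
    simp only [gnsKept, PySem.Chars.isdigit, Bool.or_eq_true, Bool.and_eq_true,
      decide_eq_true_eq, beq_iff_eq] at h
    rcases h with (⟨h1, h2⟩ | h3) | h3
    · have g1 : ('0' : Char).val.toNat ≤ c.val.toNat := UInt32.le_iff_toNat_le.mp (Char.le_def.mp h1)
      have g2 : c.val.toNat ≤ ('9' : Char).val.toNat := UInt32.le_iff_toNat_le.mp (Char.le_def.mp h2)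
      exact Or.inl ⟨g1, g2⟩
    · subst h3; exact Or.inr (Or.inl rfl)
    · subst h3; exact Or.inr (Or.inr rfl)
  simp only [PySem.Chars.isspace]
  simp only [Bool.or_eq_false_iff, Bool.and_eq_false_iff, decide_eq_false_iff_not]
  omega

theorem gnsAltGo_accum (cs : List Char) (out : List (List Char)) (buf : List Char) :
    gnsAltGo cs out buf = out ++ gnsAltGo cs [] buf := by
  induction cs generalizing out buf with
  | nil => simp only [gnsAltGo]; split <;> simp
  | cons c rest ih =>
    simp only [gnsAltGo]
    split
    · rw [ih out (buf ++ [c]), ih [] (buf ++ [c])]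
    · split
      · rw [ih (out ++ [buf]) [], ih ([] ++ [buf]) []]
        simp
      · rw [ih out []]

-- the core invariant: A's split-then-filter over the mapped characters equals B's buffered pass
theorem gns_core (cs : List Char) (buf : List Char) (acc : List (List Char)) :
    List.filter PySem.Chars.strIsdigit
        (PySem.Chars.split₀.go (cs.map (fun c => if gnsKept c then c else ' ')) buf.reverse acc)
      = (acc.reverse).filter PySem.Chars.strIsdigit ++ gnsAltGo cs [] buf := by
  induction cs generalizing buf acc with
  | nil =>
    simp only [List.map_nil, PySem.Chars.split₀.go, gnsAltGo]
    by_cases hb : buf = []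
    · subst hb; simp
    · have hne : buf.reverse.isEmpty = false := by simp [hb]
      rw [hne]
      simp only [Bool.false_eq_true, if_false, List.reverse_cons, List.reverse_reverse,
        List.filter_append]
      have hbne : (!buf.isEmpty) = true := by simp [hb]
      rw [hbne, Bool.true_and]
      by_cases hd : PySem.Chars.strIsdigit buf = true
      · simp [hd]
      · simp [hd]
  | cons c rest ih =>
    simp only [List.map_cons]
    by_cases hk : gnsKept c = true
    · rw [if_pos hk]
      simp only [PySem.Chars.split₀.go]
      rw [if_neg (by simp [gnsKept_not_space c hk])]
      rw [show c :: buf.reverse = (buf ++ [c]).reverse from by simp]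
      rw [ih (buf ++ [c]) acc]
      simp only [gnsAltGo]
      rw [if_pos (show (PySem.Chars.isdigit c || c == '.' || c == ':') = true from hk)]
    · rw [if_neg (by simp [hk])]
      simp only [PySem.Chars.split₀.go]
      rw [if_pos (show PySem.Chars.isspace ' ' = true from by decide)]
      by_cases hb : buf = []
      · subst hb
        rw [if_pos (show (List.reverse ([] : List Char)).isEmpty = true from rfl)]
        have h0 := ih [] acc
        simp only [List.reverse_nil] at h0
        rw [h0]
        simp only [gnsAltGo]
        rw [if_neg (show ¬ (PySem.Chars.isdigit c || c == '.' || c == ':') = true from by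
          simpa [gnsKept] using hk)]
        simp
      · rw [if_neg (by simp [hb])]
        rw [List.reverse_reverse]
        have h0 := ih [] (buf :: acc)
        simp only [List.reverse_nil] at h0
        rw [h0]
        simp only [gnsAltGo]
        rw [if_neg (show ¬ (PySem.Chars.isdigit c || c == '.' || c == ':') = true from by
          simpa [gnsKept] using hk)]
        have hbne : (!buf.isEmpty) = true := by simp [hb]
        rw [hbne, Bool.true_and]
        by_cases hd : PySem.Chars.strIsdigit buf = true
        · rw [if_pos hd, gnsAltGo_accum rest ([] ++ [buf]) []]
          simp [hd]
        · rw [if_neg hd]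
          simp [hd]

theorem gns_foldl_single {α β : Type} (f : α → β) (cs : List α) (acc : List β) :
    cs.foldl (fun a c => a ++ [f c]) acc = acc ++ cs.map f := by
  induction cs generalizing acc with
  | nil => simp
  | cons c rest ih => simp [ih]

theorem gns_foldl_filter {α : Type} (p : α → Bool) (xs : List α) (acc : List α) :
    xs.foldl (fun l r => if p r then l ++ [r] else l) acc = acc ++ xs.filter p := by
  induction xs generalizing acc with
  | nil => simp
  | cons x rest ih =>
    simp only [List.foldl_cons, List.filter_cons]
    by_cases h : p x = true
    · rw [if_pos h, if_pos h, ih]; simp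
    · rw [if_neg h, if_neg h, ih]

theorem gns_lists (cs : List Char) :
    (PySem.Chars.split₀ (PySem.Chars.join []
        (cs.foldl (fun acc c =>
          acc ++ [if PySem.Chars.isdigit c || c == '.' || c == ':' then [c] else [' ']]) []))).foldl
      (fun lista r => if PySem.Chars.strIsdigit r then lista ++ [r] else lista) []
      = gnsAltGo cs [] [] := by
  rw [gns_foldl_single, List.nil_append]
  have hm : cs.map (fun c => if PySem.Chars.isdigit c || c == '.' || c == ':' then [c] else [' '])
      = (cs.map (fun c => if gnsKept c then c else ' ')).map (fun c => [c]) := by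
    rw [List.map_map]
    apply List.map_congr_left
    intro c _
    simp only [Function.comp_def]
    cases hgc : (PySem.Chars.isdigit c || c == '.' || c == ':') with
    | false => simp [gnsKept, hgc]
    | true => simp [gnsKept, hgc]
  rw [hm, PySem.Chars.join_nil_singletons]
  unfold PySem.Chars.split₀
  rw [gns_foldl_filter, List.nil_append]
  have h := gns_core cs [] []
  simpa using h

-- ===== VERDICT (by name: the statement is the Claim_ definition above) =====
theorem get_numbers_sequence_spec : Claim_equal_get_numbers_sequence := by
  intro content _
  show get_numbers_sequence content = get_numbers_sequence_alt content
  exact congrArg (List.map String.mk)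
    (gns_lists (PySem.Str.replace (PySem.Str.replace content "\\n" "\n") "\n" " ").toList)
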